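-- pv_equiv track=rewrite | github.com/Jonnty/aoc | 2019/04/quicker.py | valid2
-- ===== SOURCE A (Python) =====
-- def valid2(n):
--     numbers = [int(d) for d in str(n)]
--     if len(numbers) != 6: return False
--     repeated = False # now means EXACTLY twice
--     groupsize = 0
--     for i in range(1, 6):
--         if numbers[i-1] > numbers[i]:
--             return False
--         if numbers[i-1] != numbers[i]:
--             if groupsize == 2: repeated = True
--             groupsize = 0
--         else:
--             if groupsize == 0 : groupsize = 2
--             else: groupsize += 1
--     return repeated or groupsize == 2
-- ===== SOURCE B (Python) =====
-- def valid2(n):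
--     numbers = [int(d) for d in str(n)]
--     if len(numbers) != 6:
--         return False
--     if any(a > b for a, b in zip(numbers, numbers[1:])):
--         return False
--     run_lengths = []
--     run = 1
--     for prev, cur in zip(numbers, numbers[1:]):
--         if cur == prev:
--             run += 1
--         else:
--             run_lengths.append(run)
--             run = 1
--     run_lengths.append(run)
--     return 2 in run_lengths
-- ===== Notes on version B (the rewrite author's own statement) =====
-- stated objective: idiomatic
-- what changed: Replaces A's single interleaved state machine (repeated/groupsize flags with in-loop early returns) by two separate passes: an any() check for monotonicity, then a collected list of run lengths checked for membership of 2.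
import Mathlib
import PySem

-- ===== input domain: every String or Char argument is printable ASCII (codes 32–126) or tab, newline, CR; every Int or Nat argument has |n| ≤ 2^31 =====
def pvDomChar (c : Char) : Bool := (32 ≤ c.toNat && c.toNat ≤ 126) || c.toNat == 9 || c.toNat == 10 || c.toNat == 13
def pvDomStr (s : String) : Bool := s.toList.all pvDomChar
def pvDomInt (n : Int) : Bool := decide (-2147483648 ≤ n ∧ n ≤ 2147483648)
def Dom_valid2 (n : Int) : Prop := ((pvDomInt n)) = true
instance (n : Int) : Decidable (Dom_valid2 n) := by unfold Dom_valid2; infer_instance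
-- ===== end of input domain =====

-- B restructures A's interleaved state machine into two separate passes (monotone check, then run lengths); return-value equivalence proved for n ≥ 0 (A raises ValueError on int('-') for negative n).

-- ===== PORT A =====
-- [int(d) for d in str(n)]: exact for digit characters; for n < 0 Python raises (excluded by Pre_)
def pvDigits (n : Int) : List Int :=
  (PySem.Int.toChars n).map (fun c => ((c.toNat : Int) - 48))

-- the 'for i in range(1,6)' loop over adjacent pairs, carrying (repeated, groupsize), with early return
def pvGoA : Int → List Int → Bool → Int → Bool
  | _, [], repeated, groupsize => repeated || (groupsize == 2)
  | prev, x :: rest, repeated, groupsize =>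
    if prev > x then false
    else if prev ≠ x then
      pvGoA x rest (if groupsize == 2 then true else repeated) 0
    else
      pvGoA x rest repeated (if groupsize == 0 then 2 else groupsize + 1)

def valid2 (n : Int) : Bool :=
  let numbers := pvDigits n
  if numbers.length ≠ 6 then false
  else
    match numbers with
    | [] => false   -- unreachable: length is 6
    | x :: rest => pvGoA x rest false 0

-- ===== PORT B =====
-- the run-length collecting loop over adjacent pairs of Source B
def pvGoB : List (Int × Int) → List Int → Int → List Int
  | [], acc, run => acc ++ [run]
  | (p, c) :: rest, acc, run =>
    if c == p then pvGoB rest acc (run + 1)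
    else pvGoB rest (acc ++ [run]) 1

def valid2_alt (n : Int) : Bool :=
  let numbers := pvDigits n
  if numbers.length ≠ 6 then false
  else if (numbers.zip numbers.tail).any (fun pc => pc.1 > pc.2) then false
  else (pvGoB (numbers.zip numbers.tail) [] 1).contains 2

-- ===== PRECONDITION & SPEC =====
-- Pre_ excludes negative inputs, on which Python A (and B) raise ValueError from int of the minus sign.
def Pre_valid2 (n : Int) : Prop := 0 ≤ n
instance (n : Int) : Decidable (Pre_valid2 n) := by unfold Pre_valid2; infer_instance
def pvWitness_valid2 : Int := 111122

def Spec_valid2 (n : Int) (out : Bool) : Prop := out = valid2_alt n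
instance (n : Int) (out : Bool) : Decidable (Spec_valid2 n out) := by unfold Spec_valid2; infer_instance

-- ===== CLAIM =====
def Claim_equal_valid2 : Prop := ∀ (n : Int), Dom_valid2 n → Pre_valid2 n → Spec_valid2 n (valid2 n)

-- ===== LEMMAS AND PROOFS =====
-- if some adjacent pair decreases, A's loop returns False whatever its state
theorem pvGoA_of_desc (rest : List Int) : ∀ (prev : Int) (rep : Bool) (gs : Int),
    ((prev :: rest).zip rest).any (fun pc => pc.1 > pc.2) = true →
    pvGoA prev rest rep gs = false := by
  induction rest with
  | nil => intro prev rep gs h; simp at h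
  | cons x r ih =>
    intro prev rep gs h
    simp only [List.zip_cons_cons, List.any_cons, Bool.or_eq_true, decide_eq_true_eq] at h
    by_cases hgt : prev > x
    · simp [pvGoA, hgt]
    · have h' : ((x :: r).zip r).any (fun pc => pc.1 > pc.2) = true := by
        rcases h with h | h
        · exact absurd h hgt
        · exact h
      by_cases hne : prev = x <;> simp [pvGoA, hgt, hne, ih x _ _ h']

-- loop invariant: A's (repeated, groupsize) state corresponds to B's (acc, run)
theorem pvGoA_sorted (rest : List Int) : ∀ (prev : Int) (acc : List Int) (run : Int),
    ((prev :: rest).zip rest).any (fun pc => pc.1 > pc.2) = false →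
    1 ≤ run →
    pvGoA prev rest (acc.contains 2) (if run = 1 then 0 else run) =
      (pvGoB ((prev :: rest).zip rest) acc run).contains 2 := by
  induction rest with
  | nil =>
    intro prev acc run _ hrun
    show (acc.contains 2 || ((if run = 1 then (0:Int) else run) == 2)) =
      (acc ++ [run]).contains 2
    have h2 : ((run : Int) = 2) ∨ ¬ ((2 : Int) = run) := by omega
    rcases h2 with h2 | h2
    · by_cases h1 : run = 1 <;> simp [h1, h2]
    · have h2'' : ¬ run = 2 := fun h => h2 h.symm
      by_cases h1 : run = 1 <;> simp [h1, h2, h2'']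
  | cons x r ih =>
    intro prev acc run hs hrun
    simp only [List.zip_cons_cons, List.any_cons, Bool.or_eq_false_iff,
      decide_eq_false_iff_not, not_lt] at hs
    obtain ⟨hle, hs'⟩ := hs
    rw [List.zip_cons_cons]
    have hngt : ¬ prev > x := not_lt.mpr hle
    by_cases heq : prev = x
    · subst heq
      have stepA : ∀ (R : Bool) (gs : Int), pvGoA prev (prev :: r) R gs =
          pvGoA prev r R (if gs == 0 then 2 else gs + 1) := by
        intro R gs
        simp only [pvGoA]
        rw [if_neg hngt, if_neg (not_not_intro rfl)]
      have stepB : pvGoB ((prev, prev) :: (prev :: r).zip r) acc run =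
          pvGoB ((prev :: r).zip r) acc (run + 1) := by
        simp only [pvGoB, beq_self_eq_true, if_true]
      have egs : (if (if run = 1 then (0:Int) else run) == 0 then (2:Int)
          else (if run = 1 then (0:Int) else run) + 1) = run + 1 := by
        by_cases h1 : run = 1
        · simp [h1]
        · have e2 : ((run : Int) == 0) = false := by simp; omega
          simp [h1, e2]
      have hih := ih prev acc (run + 1) hs' (by omega)
      rw [if_neg (by omega : ¬ run + 1 = 1)] at hih
      rw [stepA, stepB, egs, hih]
    · have stepA : ∀ (R : Bool) (gs : Int), pvGoA prev (x :: r) R gs =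
          pvGoA x r (if gs == 2 then true else R) 0 := by
        intro R gs
        simp only [pvGoA]
        rw [if_neg hngt, if_pos heq]
      have stepB : pvGoB ((prev, x) :: (x :: r).zip r) acc run =
          pvGoB ((x :: r).zip r) (acc ++ [run]) 1 := by
        have hne : ((x : Int) == prev) = false := by simp [Ne.symm heq]
        simp only [pvGoB, hne, Bool.false_eq_true, if_false]
      have hrep : (if (if run = 1 then (0:Int) else run) == 2 then true
          else acc.contains 2) = (acc ++ [run]).contains 2 := by
        by_cases h2 : run = 2
        · simp [h2]
        · have hgs : ((if run = 1 then (0:Int) else run) == 2) = false := by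
            by_cases h1 : run = 1 <;> simp [h1] <;> omega
          have h2' : ¬ (2 : Int) = run := fun h => h2 h.symm
          simp [hgs, h2']
      have hih := ih x (acc ++ [run]) 1 hs' le_rfl
      rw [if_pos rfl] at hih
      rw [stepA, stepB, hrep, hih]

theorem pvGoA_main (prev : Int) (rest : List Int) :
    pvGoA prev rest false 0 =
      (if ((prev :: rest).zip rest).any (fun pc => pc.1 > pc.2) then false
       else (pvGoB ((prev :: rest).zip rest) [] 1).contains 2) := by
  by_cases h : ((prev :: rest).zip rest).any (fun pc => pc.1 > pc.2) = true
  · simp [h, pvGoA_of_desc rest prev false 0 h]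
  · have h' := eq_false_of_ne_true h
    have := pvGoA_sorted rest prev [] 1 h' le_rfl
    simpa [h'] using this

theorem valid2_eq (n : Int) : valid2 n = valid2_alt n := by
  unfold valid2 valid2_alt
  by_cases h : (pvDigits n).length = 6
  · cases hL : pvDigits n with
    | nil => simp [hL] at h
    | cons x rest =>
      simp only [hL] at h ⊢
      simp only [h, ne_eq, not_true_eq_false, if_false, List.tail_cons]
      exact pvGoA_main x rest
  · simp [h]

-- ===== VERDICT =====
theorem valid2_spec : Claim_equal_valid2 := by
  intro n _ _
  unfold Spec_valid2
  exact valid2_eq n
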